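-- pv_equiv track=rewrite | github.com/tensorflow/autograph | reference_tests/loop_control_flow_test.py | break_in_single_while
-- ===== SOURCE A (Python) =====
-- def break_in_single_while(x):
--   s = 0
--   while x > 0:
--     x -= 1
--     if x % 2 > 0:
--       break
--     s += x
--   return s
-- ===== SOURCE B (Python) =====
-- def break_in_single_while(x):
--   return x - 1 if x > 0 and x % 2 == 1 else 0
-- ===== Notes on version B (the rewrite author's own statement) =====
-- stated objective: simpler
-- what changed: Replaced the while loop with a closed-form conditional: the loop runs at most twice and yields x-1 exactly for positive odd x, else 0.
import Mathlib
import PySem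

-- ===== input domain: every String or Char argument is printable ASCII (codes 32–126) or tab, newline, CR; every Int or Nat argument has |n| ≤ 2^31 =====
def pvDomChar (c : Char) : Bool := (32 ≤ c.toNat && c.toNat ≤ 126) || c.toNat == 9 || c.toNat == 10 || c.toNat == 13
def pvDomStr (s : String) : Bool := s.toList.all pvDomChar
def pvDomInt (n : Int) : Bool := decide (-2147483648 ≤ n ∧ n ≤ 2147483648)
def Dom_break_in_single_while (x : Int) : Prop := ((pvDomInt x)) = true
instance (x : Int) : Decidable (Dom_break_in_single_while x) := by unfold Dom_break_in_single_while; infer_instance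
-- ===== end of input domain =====

-- B replaces A's while loop by a closed-form conditional (simpler, same O(1) cost).

-- ===== PORT A =====
-- literal port of A's while loop as structural recursion on x.toNat
def breakLoopA (x s : Int) : Int :=
  if _h : x > 0 then
    let x' := x - 1
    if PySem.Int.mod x' 2 > 0 then s
    else breakLoopA x' (s + x')
  else s
termination_by x.toNat
decreasing_by omega

def break_in_single_while (x : Int) : Int := breakLoopA x 0

-- ===== PORT B =====
def break_in_single_while_alt (x : Int) : Int :=
  if x > 0 ∧ PySem.Int.mod x 2 = 1 then x - 1 else 0

-- ===== PRECONDITION & SPEC =====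
def Spec_break_in_single_while (x : Int) (out : Int) : Prop := out = break_in_single_while_alt x
instance (x : Int) (out : Int) : Decidable (Spec_break_in_single_while x out) := by unfold Spec_break_in_single_while; infer_instance

-- ===== CLAIM (what is proved, stated in full; the proofs are below) =====
def Claim_equal_break_in_single_while : Prop := ∀ (x : Int), Dom_break_in_single_while x → Spec_break_in_single_while x (break_in_single_while x)

-- ===== LEMMAS AND PROOFS =====

theorem pymod_two_eq_emod (a : Int) : PySem.Int.mod a 2 = a % 2 :=
  PySem.Int.mod_eq_emod_of_pos (by omega)

-- ===== VERDICT (by name: the statement is the Claim_ definition above) =====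
theorem break_in_single_while_spec : Claim_equal_break_in_single_while := by
  intro x _
  unfold Spec_break_in_single_while break_in_single_while break_in_single_while_alt
  by_cases hpos : x > 0
  · by_cases hodd : x % 2 = 1
    · -- first iteration: x-1 is even, accumulate; second: break or exit
      rw [breakLoopA]
      simp only [hpos, dif_pos, pymod_two_eq_emod]
      have hx' : (x - 1) % 2 = 0 := by omega
      rw [if_neg (by omega)]
      rw [breakLoopA]
      by_cases h2 : x - 1 > 0
      · simp only [h2, dif_pos, pymod_two_eq_emod]
        have : (x - 1 - 1) % 2 = 1 := by omega
        rw [if_pos (by omega)]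
        simp [hpos, hodd]
      · simp only [h2, dite_false]
        have hx1 : x = 1 := by omega
        simp [hx1]
    · -- x even positive: x-1 odd, break with s = 0
      rw [breakLoopA]
      simp only [hpos, dif_pos, pymod_two_eq_emod]
      rw [if_pos (by omega)]
      simp [hodd]
  · rw [breakLoopA]
    simp [hpos]
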